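-- pv_equiv track=rewrite | github.com/kolyasalubov/Lv-609.PythonCore | HW5/Labunskiy/HW5(1).py | count_int_fetch
-- ===== SOURCE A (Python) =====
-- def count_int_fetch(numbr):
--     counter_even = sum(1 for digit in range(1, numbr+1) if digit % 2 == 0)
--     counter_not_even = sum(1 for digit in range(1, numbr+1) if digit % 3 == 0)
--     counter_other = sum(1 for digit in range(1, numbr+1)
--                               if digit % 3 != 0 and digit % 2 != 0)
--     return f"Count event digits is {counter_even},"\
--            f" count not event digits is {counter_not_even},"\
--            f" count other digits is {counter_other}."
-- ===== SOURCE B (Python) =====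
-- def count_int_fetch(numbr):
--     n = max(numbr, 0)
--     counter_even = n // 2
--     counter_not_even = n // 3
--     counter_other = n - n // 2 - n // 3 + n // 6
--     return f"Count event digits is {counter_even},"\
--            f" count not event digits is {counter_not_even},"\
--            f" count other digits is {counter_other}."
-- ===== Notes on version B (the rewrite author's own statement) =====
-- stated objective: faster
-- what changed: Replaced the three O(n) generator scans over range(1,n+1) with O(1) closed-form floor-division counts (n//2, n//3, inclusion-exclusion n - n//2 - n//3 + n//6).
import Mathlib
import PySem

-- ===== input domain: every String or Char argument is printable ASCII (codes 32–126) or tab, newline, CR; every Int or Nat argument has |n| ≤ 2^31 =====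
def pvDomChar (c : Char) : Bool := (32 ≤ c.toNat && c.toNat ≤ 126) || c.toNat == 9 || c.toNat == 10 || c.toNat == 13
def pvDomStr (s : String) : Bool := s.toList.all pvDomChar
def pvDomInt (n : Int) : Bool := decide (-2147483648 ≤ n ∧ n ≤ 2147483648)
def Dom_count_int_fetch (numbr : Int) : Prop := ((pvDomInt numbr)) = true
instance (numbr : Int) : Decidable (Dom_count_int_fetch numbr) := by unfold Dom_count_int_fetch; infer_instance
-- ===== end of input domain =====

-- B replaces A's three O(n) scans over range(1,n+1) by O(1) closed-form floor-division counts.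

-- ===== PORT A =====
-- sum(1 for digit in range(1, numbr+1) if digit % 2 == 0)
def pvSumEven (numbr : Int) : Int :=
  (PySem.List.pyRange 1 (numbr + 1)).foldl
    (fun acc digit => if PySem.Int.mod digit 2 = 0 then acc + 1 else acc) 0

-- sum(1 for digit in range(1, numbr+1) if digit % 3 == 0)
def pvSumDiv3 (numbr : Int) : Int :=
  (PySem.List.pyRange 1 (numbr + 1)).foldl
    (fun acc digit => if PySem.Int.mod digit 3 = 0 then acc + 1 else acc) 0

-- sum(1 for digit in range(1, numbr+1) if digit % 3 != 0 and digit % 2 != 0)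
def pvSumOther (numbr : Int) : Int :=
  (PySem.List.pyRange 1 (numbr + 1)).foldl
    (fun acc digit =>
      if PySem.Int.mod digit 3 ≠ 0 ∧ PySem.Int.mod digit 2 ≠ 0 then acc + 1 else acc) 0

def count_int_fetch (numbr : Int) : String :=
  let counter_even := pvSumEven numbr
  let counter_not_even := pvSumDiv3 numbr
  let counter_other := pvSumOther numbr
  "Count event digits is " ++ PySem.Int.toStr counter_even ++
  ", count not event digits is " ++ PySem.Int.toStr counter_not_even ++
  ", count other digits is " ++ PySem.Int.toStr counter_other ++ "."

-- ===== PORT B =====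
def count_int_fetch_alt (numbr : Int) : String :=
  let n := max numbr 0
  let counter_even := PySem.Int.floordiv n 2
  let counter_not_even := PySem.Int.floordiv n 3
  let counter_other := n - PySem.Int.floordiv n 2 - PySem.Int.floordiv n 3 + PySem.Int.floordiv n 6
  "Count event digits is " ++ PySem.Int.toStr counter_even ++
  ", count not event digits is " ++ PySem.Int.toStr counter_not_even ++
  ", count other digits is " ++ PySem.Int.toStr counter_other ++ "."

-- ===== PRECONDITION & SPEC =====
def Spec_count_int_fetch (numbr : Int) (out : String) : Prop := out = count_int_fetch_alt numbr
instance (numbr : Int) (out : String) : Decidable (Spec_count_int_fetch numbr out) := by unfold Spec_count_int_fetch; infer_instance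

-- ===== CLAIM (what is proved, stated in full; the proofs are below) =====
def Claim_equal_count_int_fetch : Prop := ∀ (numbr : Int), Dom_count_int_fetch numbr → Spec_count_int_fetch numbr (count_int_fetch numbr)

-- ===== LEMMAS AND PROOFS =====

theorem pvSumEven_eq (m : Nat) : pvSumEven (m : Int) = ((m / 2 : Nat) : Int) := by
  induction m with
  | zero => decide
  | succ k ih =>
    unfold pvSumEven at *
    rw [show ((k + 1 : Nat) : Int) + 1 = ((k : Int) + 1) + 1 by push_cast; ring,
        PySem.List.pyRange_one_succ_right (by omega), List.foldl_append]
    simp only [List.foldl]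
    rw [show PySem.Int.mod ((k : Int) + 1) 2 = (((k + 1) % 2 : Nat) : Int) from by
          rw [show (k : Int) + 1 = ((k + 1 : Nat) : Int) by push_cast; ring]
          exact_mod_cast PySem.Int.mod_natCast (k + 1) 2]
    split_ifs with h
    · rw [ih]
      have h' : (k + 1) % 2 = 0 := by exact_mod_cast h
      have : (k + 1) / 2 = k / 2 + 1 := by omega
      omega
    · rw [ih]
      have h' : ¬ ((k + 1) % 2 = 0) := fun hh => h (by exact_mod_cast congrArg (Nat.cast : Nat → Int) hh)
      have : (k + 1) / 2 = k / 2 := by omega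
      omega

theorem pvSumDiv3_eq (m : Nat) : pvSumDiv3 (m : Int) = ((m / 3 : Nat) : Int) := by
  induction m with
  | zero => decide
  | succ k ih =>
    unfold pvSumDiv3 at *
    rw [show ((k + 1 : Nat) : Int) + 1 = ((k : Int) + 1) + 1 by push_cast; ring,
        PySem.List.pyRange_one_succ_right (by omega), List.foldl_append]
    simp only [List.foldl]
    rw [show PySem.Int.mod ((k : Int) + 1) 3 = (((k + 1) % 3 : Nat) : Int) from by
          rw [show (k : Int) + 1 = ((k + 1 : Nat) : Int) by push_cast; ring]
          exact_mod_cast PySem.Int.mod_natCast (k + 1) 3]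
    split_ifs with h
    · rw [ih]
      have h' : (k + 1) % 3 = 0 := by exact_mod_cast h
      have : (k + 1) / 3 = k / 3 + 1 := by omega
      omega
    · rw [ih]
      have h' : ¬ ((k + 1) % 3 = 0) := fun hh => h (by exact_mod_cast congrArg (Nat.cast : Nat → Int) hh)
      have : (k + 1) / 3 = k / 3 := by omega
      omega

theorem pvSumOther_eq (m : Nat) :
    pvSumOther (m : Int) = ((m - m / 2 - m / 3 + m / 6 : Nat) : Int) := by
  induction m with
  | zero => decide
  | succ k ih =>
    unfold pvSumOther at *
    rw [show ((k + 1 : Nat) : Int) + 1 = ((k : Int) + 1) + 1 by push_cast; ring,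
        PySem.List.pyRange_one_succ_right (by omega), List.foldl_append]
    simp only [List.foldl]
    rw [show PySem.Int.mod ((k : Int) + 1) 3 = (((k + 1) % 3 : Nat) : Int) from by
          rw [show (k : Int) + 1 = ((k + 1 : Nat) : Int) by push_cast; ring]
          exact_mod_cast PySem.Int.mod_natCast (k + 1) 3,
        show PySem.Int.mod ((k : Int) + 1) 2 = (((k + 1) % 2 : Nat) : Int) from by
          rw [show (k : Int) + 1 = ((k + 1 : Nat) : Int) by push_cast; ring]
          exact_mod_cast PySem.Int.mod_natCast (k + 1) 2]
    have hd2 : k / 2 ≤ k := Nat.div_le_self k 2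
    have hd3 : k / 3 ≤ k := Nat.div_le_self k 3
    split_ifs with h
    · rw [ih]
      obtain ⟨h3, h2⟩ := h
      have h3' : ¬ ((k + 1) % 3 = 0) := fun hh => h3 (by exact_mod_cast congrArg (Nat.cast : Nat → Int) hh)
      have h2' : ¬ ((k + 1) % 2 = 0) := fun hh => h2 (by exact_mod_cast congrArg (Nat.cast : Nat → Int) hh)
      omega
    · rw [ih]
      rw [not_and_or, not_not, not_not] at h
      have h' : (k + 1) % 3 = 0 ∨ (k + 1) % 2 = 0 := by
        rcases h with h | h
        · exact Or.inl (by exact_mod_cast h)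
        · exact Or.inr (by exact_mod_cast h)
      have h6 : k % 6 = 0 ∨ k % 6 = 1 ∨ k % 6 = 2 ∨ k % 6 = 3 ∨ k % 6 = 4 ∨ k % 6 = 5 := by omega
      rcases h' with h' | h' <;>
        rcases h6 with h6 | h6 | h6 | h6 | h6 | h6 <;> omega

theorem pvRange_neg (numbr : Int) (h : numbr ≤ 0) :
    PySem.List.pyRange 1 (numbr + 1) = ([] : List Int) :=
  PySem.List.pyRange_one_eq_nil (by omega)

-- ===== VERDICT (by name: the statement is the Claim_ definition above) =====
theorem count_int_fetch_spec : Claim_equal_count_int_fetch := by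
  intro numbr _
  unfold Spec_count_int_fetch
  simp only [count_int_fetch, count_int_fetch_alt]
  by_cases h : numbr ≤ 0
  · have hmax : max numbr 0 = 0 := by omega
    have he : pvSumEven numbr = 0 := by unfold pvSumEven; rw [pvRange_neg numbr h]; rfl
    have h3 : pvSumDiv3 numbr = 0 := by unfold pvSumDiv3; rw [pvRange_neg numbr h]; rfl
    have ho : pvSumOther numbr = 0 := by unfold pvSumOther; rw [pvRange_neg numbr h]; rfl
    rw [hmax, he, h3, ho]
    rfl
  · have hmax : max numbr 0 = numbr := by omega
    obtain ⟨m, rfl⟩ : ∃ m : Nat, numbr = (m : Int) := ⟨numbr.toNat, by omega⟩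
    have e2 : PySem.Int.floordiv ((m : Nat) : Int) 2 = ((m / 2 : Nat) : Int) := by
      exact_mod_cast PySem.Int.floordiv_natCast m 2
    have e3 : PySem.Int.floordiv ((m : Nat) : Int) 3 = ((m / 3 : Nat) : Int) := by
      exact_mod_cast PySem.Int.floordiv_natCast m 3
    have e6 : PySem.Int.floordiv ((m : Nat) : Int) 6 = ((m / 6 : Nat) : Int) := by
      exact_mod_cast PySem.Int.floordiv_natCast m 6
    have hd2 : m / 2 ≤ m := Nat.div_le_self m 2
    have hd3 : m / 3 ≤ m := Nat.div_le_self m 3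
    have hcast : ((m - m / 2 - m / 3 + m / 6 : Nat) : Int)
        = (m : Int) - ((m / 2 : Nat) : Int) - ((m / 3 : Nat) : Int) + ((m / 6 : Nat) : Int) := by
      push_cast [Nat.cast_sub hd2]
      omega
    rw [hmax, pvSumEven_eq, pvSumDiv3_eq, pvSumOther_eq, e2, e3, e6, hcast]
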